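-- pv_equiv track=rewrite | github.com/k-harada/AtCoder | ABC/ABC251-300/ABC298/E.py | solve
-- ===== SOURCE A (Python) =====
-- MOD = 998244353
--
-- def solve(n, a, b, p, q):
--     p_inv = pow(p, MOD - 2, MOD)
--     q_inv = pow(q, MOD - 2, MOD)
--     dp_a = [[0] * (n + 1) for _ in range(n + 1)]
--     dp_b = [[0] * (n + 1) for _ in range(n + 1)]
--
--     # 高橋君
--     dp_a[0][a] = 1
--     for t in range(n):
--         for i in range(n):
--             for j in range(1, p + 1):
--                 dp_a[t + 1][min(n, i + j)] += dp_a[t][i] * p_inv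
--         for j in range(n + 1):
--             dp_a[t + 1][j] %= MOD
--     # 青木君
--     dp_b[0][b] = 1
--     for t in range(n):
--         for i in range(n):
--             for j in range(1, q + 1):
--                 dp_b[t + 1][min(n, i + j)] += dp_b[t][i] * q_inv
--         for j in range(n + 1):
--             dp_b[t + 1][j] %= MOD
--     # 判定
--     # 高橋君がt回目でゴールかつ青木君がi回目以降にゴール
--     res = 0
--     for t in range(n + 1):
--         res += dp_a[t][n] * sum([dp_b[s][n] for s in range(t, n + 1)])
--         res %= MOD
--     return res
-- ===== SOURCE B (Python) =====
-- MOD = 998244353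
--
--
-- def _first_arrivals(n, start, k, k_inv):
--     # hits[t] = probability (mod MOD) of first reaching position n at step t.
--     dist = [0] * (n + 1)
--     dist[start] = 1
--     hits = [dist[n]]
--     for _ in range(n):
--         # prefix sums of the current distribution over positions 0..n-1
--         P = [0] * (n + 1)
--         W = [0] * (n + 1)
--         for i in range(n):
--             P[i + 1] = P[i] + dist[i]
--             W[i + 1] = W[i] + i * dist[i]
--         nxt = [0] * (n + 1)
--         for m in range(1, n):
--             nxt[m] = k_inv * (P[m] - P[max(0, m - k)]) % MOD
--         lo = max(0, n - k)
--         nxt[n] = k_inv * ((k - n + 1) * (P[n] - P[lo]) + (W[n] - W[lo])) % MOD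
--         dist = nxt
--         hits.append(dist[n])
--     return hits
--
--
-- def solve(n, a, b, p, q):
--     p_inv = pow(p, MOD - 2, MOD)
--     q_inv = pow(q, MOD - 2, MOD)
--     hits_a = _first_arrivals(n, a, p, p_inv)
--     hits_b = _first_arrivals(n, b, q, q_inv)
--     res = 0
--     suf = 0
--     for t in reversed(range(n + 1)):
--         suf = (suf + hits_b[t]) % MOD
--         res = (res + hits_a[t] * suf) % MOD
--     return res
-- ===== Notes on version B (the rewrite author's own statement) =====
-- stated objective: faster
-- what changed: A convolves each dp step with an O(n*p) double loop over positions and die faces and recomputes a suffix sum per step at the end (O(n^2*(p+q)) plus an O(n^2) final pass); B replaces each step by O(n) prefix-sum/window formulas (prefix sums P and weighted prefix sums W of the distribution give every new entry in O(1)) and replaces the final quadratic suffix-sum pass by one backward accumulation, giving O(n^2) total.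
-- outside the precondition, e.g. on solve(2, 2, 2, -1, 1): A returns 1, B raises IndexError
import Mathlib
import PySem

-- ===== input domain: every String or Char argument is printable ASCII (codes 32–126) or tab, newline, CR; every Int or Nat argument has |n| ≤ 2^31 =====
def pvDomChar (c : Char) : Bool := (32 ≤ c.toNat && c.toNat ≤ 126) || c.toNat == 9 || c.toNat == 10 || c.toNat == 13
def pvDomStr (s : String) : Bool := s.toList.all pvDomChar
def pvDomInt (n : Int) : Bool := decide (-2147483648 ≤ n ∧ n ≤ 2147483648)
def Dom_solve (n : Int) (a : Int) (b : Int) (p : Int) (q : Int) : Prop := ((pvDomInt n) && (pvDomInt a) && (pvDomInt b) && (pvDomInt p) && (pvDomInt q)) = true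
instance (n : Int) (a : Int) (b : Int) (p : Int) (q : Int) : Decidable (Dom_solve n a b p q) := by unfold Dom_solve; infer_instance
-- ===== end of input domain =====

-- B replaces A's O(n^2·p) per-step inner convolution loop by an O(n) prefix-sum
-- (range-window) computation per step and replaces the quadratic final
-- suffix-sum pass by one backward accumulation; same return value.

def pvMOD : Int := 998244353

-- shared helpers: Python list indexing/assignment (incl. negative indices) and 'dp[0][s] = 1'
def pvGet (xs : List Int) (i : Int) : Int := PySem.List.pyGetD xs i 0
def pvGetRow (xs : List (List Int)) (i : Int) : List Int := PySem.List.pyGetD xs i []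
def pvSeed (n s : Int) : List Int := PySem.List.pySetD (List.replicate (n+1).toNat 0) s 1

-- three-argument pow(b, e, m) for m > 0: modular square-and-multiply; exact — it returns
-- the canonical residue b^e mod m in [0, m), which is what Python's pow returns for m > 0
def pvPowMod (bse : Int) (e : Nat) (m : Int) : Int :=
  if h : e = 0 then 1 % m
  else
    let hlf := pvPowMod bse (e / 2) m
    let sq := hlf * hlf % m
    if e % 2 = 1 then sq * (bse % m) % m else sq
termination_by e
decreasing_by exact Nat.div_lt_self (by omega) (by omega)

-- ===== PORT A =====
-- 'dp[t+1][min(n,i+j)] += dp[t][i] * inv'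
def pvBump (l : List Int) (e v : Int) : List Int := PySem.List.pySetD l e (pvGet l e + v)

-- the two inner loops 'for i in range(n): for j in range(1, k+1): …'
def pvStepA (n k kinv : Int) (old tgt : List Int) : List Int :=
  (PySem.List.pyRange 0 n).foldl
    (fun acc i => (PySem.List.pyRange 1 (k+1)).foldl
       (fun acc2 j => pvBump acc2 (min n (i+j)) (pvGet old i * kinv)) acc) tgt

-- 'for j in range(n+1): dp[t+1][j] %= MOD'
def pvModRow (n : Int) (row : List Int) : List Int :=
  (PySem.List.pyRange 0 (n+1)).foldl
    (fun r j => PySem.List.pySetD r j (PySem.Int.mod (pvGet r j) pvMOD)) row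

-- builds one player's dp table (the '高橋君' / '青木君' loop, written once, used twice)
def pvTableA (n s k kinv : Int) : List (List Int) :=
  (PySem.List.pyRange 0 n).foldl
    (fun tbl t => PySem.List.pySetD tbl (t+1)
       (pvModRow n (pvStepA n k kinv (pvGetRow tbl t) (pvGetRow tbl (t+1)))))
    (PySem.List.pySetD (List.replicate (n+1).toNat (List.replicate (n+1).toNat 0)) 0 (pvSeed n s))

def solve (n : Int) (a : Int) (b : Int) (p : Int) (q : Int) : Int :=
  let pinv := pvPowMod p 998244351 pvMOD   -- pow(p, MOD-2, MOD)
  let qinv := pvPowMod q 998244351 pvMOD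
  let dpA := pvTableA n a p pinv
  let dpB := pvTableA n b q qinv
  (PySem.List.pyRange 0 (n+1)).foldl
    (fun res t => PySem.Int.mod (res + pvGet (pvGetRow dpA t) n *
       ((PySem.List.pyRange t (n+1)).foldl (fun s u => s + pvGet (pvGetRow dpB u) n) 0)) pvMOD) 0

-- ===== PORT B =====
-- one step: prefix sums P/W of the current distribution, then each new entry by a window formula
def pvStepB (n k kinv : Int) (dist : List Int) : List Int :=
  let PW := (PySem.List.pyRange 0 n).foldl
    (fun (pw : List Int × List Int) i =>
      (PySem.List.pySetD pw.1 (i+1) (pvGet pw.1 i + pvGet dist i),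
       PySem.List.pySetD pw.2 (i+1) (pvGet pw.2 i + i * pvGet dist i)))
    (List.replicate (n+1).toNat 0, List.replicate (n+1).toNat 0)
  let nxt := (PySem.List.pyRange 1 n).foldl
    (fun l m => PySem.List.pySetD l m
       (PySem.Int.mod (kinv * (pvGet PW.1 m - pvGet PW.1 (max 0 (m-k)))) pvMOD))
    (List.replicate (n+1).toNat 0)
  PySem.List.pySetD nxt n
    (PySem.Int.mod (kinv * ((k-n+1) * (pvGet PW.1 n - pvGet PW.1 (max 0 (n-k)))
       + (pvGet PW.2 n - pvGet PW.2 (max 0 (n-k))))) pvMOD)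

-- hits[t] = probability of first reaching n at step t
def pvFirstArrivals (n s k kinv : Int) : List Int :=
  ((PySem.List.pyRange 0 n).foldl
    (fun (st : List Int × List Int) _ =>
      let nxt := pvStepB n k kinv st.1
      (nxt, st.2 ++ [pvGet nxt n]))
    (pvSeed n s, [pvGet (pvSeed n s) n])).2

def solve_alt (n : Int) (a : Int) (b : Int) (p : Int) (q : Int) : Int :=
  let pinv := pvPowMod p 998244351 pvMOD
  let qinv := pvPowMod q 998244351 pvMOD
  let ha := pvFirstArrivals n a p pinv
  let hb := pvFirstArrivals n b q qinv
  (((PySem.List.pyRange 0 (n+1)).reverse).foldl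
    (fun (rs : Int × Int) t =>
      let suf := PySem.Int.mod (rs.2 + pvGet hb t) pvMOD
      (PySem.Int.mod (rs.1 + pvGet ha t * suf) pvMOD, suf)) ((0 : Int), (0 : Int))).1

-- ===== PRECONDITION & SPEC =====
-- Pre_ excludes: n < 0 or a start position outside [-(n+1), n], where A raises IndexError;
-- and negative die sizes p < 0 / q < 0, where A's empty inner loop returns an accidental
-- all-zero distribution while B's difference-window formula would index out of range.
def Pre_solve (n : Int) (a : Int) (b : Int) (p : Int) (q : Int) : Prop :=
  0 ≤ n ∧ -(n+1) ≤ a ∧ a ≤ n ∧ -(n+1) ≤ b ∧ b ≤ n ∧ 0 ≤ p ∧ 0 ≤ q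
instance (n : Int) (a : Int) (b : Int) (p : Int) (q : Int) : Decidable (Pre_solve n a b p q) := by
  unfold Pre_solve; infer_instance
def pvWitness_solve : Int × Int × Int × Int × Int := (3, 1, 2, 2, 3)

def Spec_solve (n : Int) (a : Int) (b : Int) (p : Int) (q : Int) (out : Int) : Prop := out = solve_alt n a b p q
instance (n : Int) (a : Int) (b : Int) (p : Int) (q : Int) (out : Int) : Decidable (Spec_solve n a b p q out) := by unfold Spec_solve; infer_instance

-- ===== CLAIM (what is proved, stated in full; the proofs are below) =====
def Claim_equal_solve : Prop := ∀ (n : Int) (a : Int) (b : Int) (p : Int) (q : Int), Dom_solve n a b p q → Pre_solve n a b p q → Spec_solve n a b p q (solve n a b p q)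

-- ===== LEMMAS AND PROOFS =====

-- range sums
def rsum (lo hi : Int) (f : Int → Int) : Int := ((PySem.List.pyRange lo hi).map f).sum

-- B's step iterated, starting from the seed row
def itB (n k kinv s : Int) : Nat → List Int
  | 0 => pvSeed n s
  | (m+1) => pvStepB n k kinv (itB n k kinv s m)

theorem rsum_nil {lo hi : Int} (f : Int → Int) (h : hi ≤ lo) : rsum lo hi f = 0 := by
  simp [rsum, PySem.List.pyRange_one_eq_nil h]

theorem rsum_cons {lo hi : Int} (f : Int → Int) (h : lo < hi) :
    rsum lo hi f = f lo + rsum (lo+1) hi f := by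
  rw [rsum, PySem.List.pyRange_one_cons h]; simp [rsum]

theorem rsum_snoc {lo hi : Int} (f : Int → Int) (h : lo ≤ hi) :
    rsum lo (hi+1) f = rsum lo hi f + f hi := by
  rw [rsum, PySem.List.pyRange_one_succ_right h]; simp [rsum]

theorem rsum_split {lo hi : Int} (m : Int) (f : Int → Int) (h1 : lo ≤ m) (h2 : m ≤ hi) :
    rsum lo hi f = rsum lo m f + rsum m hi f := by
  rw [rsum, PySem.List.pyRange_one_append lo m hi h1 h2]; simp [rsum]

theorem rsum_congr {lo hi : Int} {f g : Int → Int}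
    (h : ∀ i, lo ≤ i → i < hi → f i = g i) : rsum lo hi f = rsum lo hi g := by
  unfold rsum
  congr 1
  exact List.map_congr_left (fun x hx => h x (PySem.List.mem_pyRange_one.1 hx).1 (PySem.List.mem_pyRange_one.1 hx).2)

theorem rsum_zero {lo hi : Int} {f : Int → Int}
    (h : ∀ i, lo ≤ i → i < hi → f i = 0) : rsum lo hi f = 0 := by
  rw [rsum_congr (g := fun _ => 0) h]
  simp [rsum]

theorem rsum_add {lo hi : Int} (f g : Int → Int) :
    rsum lo hi (fun i => f i + g i) = rsum lo hi f + rsum lo hi g := by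
  exact PySem.List.sum_map_add_int _ _ _

theorem rsum_cmul {lo hi : Int} (c : Int) (f : Int → Int) :
    rsum lo hi (fun i => c * f i) = c * rsum lo hi f := by
  simp [rsum, List.sum_map_mul_left]

theorem rsum_const {lo hi : Int} (c : Int) :
    rsum lo hi (fun _ => c) = ((hi - lo).toNat : Int) * c := by
  simp [rsum]

theorem rsum_indicator {lo hi : Int} (c w : Int) :
    rsum lo hi (fun j => if j = c then w else 0) = if lo ≤ c ∧ c < hi then w else 0 := by
  by_cases h : lo ≤ c ∧ c < hi
  · rw [rsum_split c _ h.1 (by omega), rsum_cons _ h.2,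
      rsum_zero (f := fun j => if j = c then w else 0) (by intro i h1 h2; simp; omega),
      rsum_zero (f := fun j => if j = c then w else 0) (by intro i h1 h2; simp; omega)]
    simp [h]
  · rw [rsum_zero (by intro i h1 h2; simp; omega)]
    simp [h]

theorem rsum_indicator_ge {lo hi c : Int} (w : Int) (h : lo ≤ c) :
    rsum lo hi (fun j => if c ≤ j then w else 0) = ((hi - c).toNat : Int) * w := by
  by_cases hc : c < hi
  · rw [rsum_split c _ h (by omega),
      rsum_zero (f := fun j => if c ≤ j then w else 0) (by intro i h1 h2; simp; omega),
      rsum_congr (g := fun _ => w) (by intro i h1 h2; simp [h1]),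
      rsum_const]
    omega
  · rw [rsum_zero (by intro i h1 h2; simp; omega),
      Int.toNat_of_nonpos (by omega : hi - c ≤ 0)]
    simp

theorem rsum_modeq {M : Int} {f g : Int → Int} : ∀ (d : Nat) {lo hi : Int}, hi - lo ≤ (d : Int) →
    (∀ i, lo ≤ i → i < hi → Int.ModEq M (f i) (g i)) →
    Int.ModEq M (rsum lo hi f) (rsum lo hi g) := by
  intro d
  induction d with
  | zero =>
    intro lo hi hd _
    rw [rsum_nil _ (by omega), rsum_nil _ (by omega)]
  | succ d ih =>
    intro lo hi hd h
    by_cases hlt : lo < hi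
    · rw [rsum_cons _ hlt, rsum_cons _ hlt]
      exact (h lo le_rfl hlt).add (ih (by omega) (fun i h1 h2 => h i (by omega) h2))
    · rw [rsum_nil _ (by omega), rsum_nil _ (by omega)]

-- getD-of-set, with Int indices
theorem pvGet_set (xs : List Int) (e : Int) (v : Int) (he : 0 ≤ e) (hel : e < (xs.length : Int))
    (t : Int) (ht : 0 ≤ t) : pvGet (PySem.List.pySetD xs e v) t = if t = e then v else pvGet xs t := by
  unfold pvGet
  rw [show e = ((e.toNat : Nat) : Int) by omega, show t = ((t.toNat : Nat) : Int) by omega,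
    PySem.List.pyGetD_pySetD_natCast xs e.toNat t.toNat v 0 (by omega)]
  simp only [show (t.toNat = e.toNat) ↔ ((t.toNat : Int) = (e.toNat : Int)) by omega]

theorem pvGetRow_set (xs : List (List Int)) (e : Int) (v : List Int) (he : 0 ≤ e)
    (hel : e < (xs.length : Int)) (t : Int) (ht : 0 ≤ t) :
    pvGetRow (PySem.List.pySetD xs e v) t = if t = e then v else pvGetRow xs t := by
  unfold pvGetRow
  rw [show e = ((e.toNat : Nat) : Int) by omega, show t = ((t.toNat : Nat) : Int) by omega,
    PySem.List.pyGetD_pySetD_natCast xs e.toNat t.toNat v [] (by omega)]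
  simp only [show (t.toNat = e.toNat) ↔ ((t.toNat : Int) = (e.toNat : Int)) by omega]

theorem pvGet_replicate (m : Nat) (t : Int) (ht : 0 ≤ t) : pvGet (List.replicate m 0) t = 0 := by
  unfold pvGet
  rw [PySem.List.pyGetD_of_nonneg _ _ ht]
  by_cases h : t.toNat < m
  · rw [List.getD_replicate _ h]
  · rw [List.getD_eq_default _ _ (by simpa using h)]

theorem pvGet_bump (l : List Int) (e v : Int) (he : 0 ≤ e) (hel : e < (l.length : Int))
    (t : Int) (ht : 0 ≤ t) : pvGet (pvBump l e v) t = pvGet l t + (if t = e then v else 0) := by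
  unfold pvBump
  rw [pvGet_set l e _ he hel t ht]
  split_ifs with h
  · rw [h]
  · ring

theorem foldl_length_inv {α β : Type} (l : List β) (f : List α → β → List α) (init : List α)
    (h : ∀ acc x, (f acc x).length = acc.length) : (l.foldl f init).length = init.length := by
  induction l generalizing init with
  | nil => rfl
  | cons x xs ih => simp [List.foldl_cons, ih, h]

-- ==== A-side characterization ====

theorem stepA_inner_len (n k _kinv i w : Int) (jlo : Int) (acc : List Int) :
    ((PySem.List.pyRange jlo (k+1)).foldl (fun a j => pvBump a (min n (i+j)) w) acc).length = acc.length := by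
  exact foldl_length_inv _ _ _ (fun acc2 j => by simp [pvBump, PySem.List.length_pySetD])

theorem pvBump_length (l : List Int) (e v : Int) : (pvBump l e v).length = l.length := by
  simp [pvBump, PySem.List.length_pySetD]

theorem stepA_inner (n k i w : Int) (hn : 1 ≤ n) (hi : 0 ≤ i) :
    ∀ (jlo : Int) (acc : List Int), 1 ≤ jlo → acc.length = (n+1).toNat → ∀ t, 0 ≤ t →
    pvGet ((PySem.List.pyRange jlo (k+1)).foldl (fun a j => pvBump a (min n (i+j)) w) acc) t
      = pvGet acc t + rsum jlo (k+1) (fun j => if t = min n (i+j) then w else 0) := by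
  suffices h : ∀ (d : Nat) (jlo : Int) (acc : List Int), (k+1) - jlo ≤ (d : Int) → 1 ≤ jlo →
      acc.length = (n+1).toNat → ∀ t, 0 ≤ t →
      pvGet ((PySem.List.pyRange jlo (k+1)).foldl (fun a j => pvBump a (min n (i+j)) w) acc) t
        = pvGet acc t + rsum jlo (k+1) (fun j => if t = min n (i+j) then w else 0) by
    intro jlo acc h1 h2 t ht
    exact h ((k+1) - jlo).toNat jlo acc (by omega) h1 h2 t ht
  intro d
  induction d with
  | zero =>
    intro jlo acc hd h1 hlen t ht
    rw [PySem.List.pyRange_one_eq_nil (by omega), rsum_nil _ (by omega)]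
    simp
  | succ d ih =>
    intro jlo acc hd h1 hlen t ht
    by_cases hlt : jlo < k+1
    · rw [PySem.List.pyRange_one_cons hlt, List.foldl_cons, rsum_cons _ hlt,
        ih (jlo+1) (pvBump acc (min n (i+jlo)) w) (by omega) (by omega)
          (by rw [pvBump_length]; exact hlen) t ht,
        pvGet_bump acc (min n (i+jlo)) w (by omega) (by rw [hlen]; omega) t ht]
      ring
    · rw [PySem.List.pyRange_one_eq_nil (by omega), rsum_nil _ (by omega)]
      simp

theorem stepA_outer (n k kinv : Int) (old : List Int) (hn : 1 ≤ n) :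
    ∀ (ilo : Int) (acc : List Int), 0 ≤ ilo → acc.length = (n+1).toNat → ∀ t, 0 ≤ t →
    pvGet ((PySem.List.pyRange ilo n).foldl
        (fun acc i => (PySem.List.pyRange 1 (k+1)).foldl
          (fun acc2 j => pvBump acc2 (min n (i+j)) (pvGet old i * kinv)) acc) acc) t
      = pvGet acc t + rsum ilo n (fun i => rsum 1 (k+1)
          (fun j => if t = min n (i+j) then pvGet old i * kinv else 0)) := by
  suffices h : ∀ (d : Nat) (ilo : Int) (acc : List Int), n - ilo ≤ (d : Int) → 0 ≤ ilo →
      acc.length = (n+1).toNat → ∀ t, 0 ≤ t →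
      pvGet ((PySem.List.pyRange ilo n).foldl
        (fun acc i => (PySem.List.pyRange 1 (k+1)).foldl
          (fun acc2 j => pvBump acc2 (min n (i+j)) (pvGet old i * kinv)) acc) acc) t
      = pvGet acc t + rsum ilo n (fun i => rsum 1 (k+1)
          (fun j => if t = min n (i+j) then pvGet old i * kinv else 0)) by
    intro ilo acc h1 h2 t ht
    exact h (n - ilo).toNat ilo acc (by omega) h1 h2 t ht
  intro d
  induction d with
  | zero =>
    intro ilo acc hd h1 hlen t ht
    rw [PySem.List.pyRange_one_eq_nil (a := ilo) (b := n) (by omega), rsum_nil (lo := ilo) _ (by omega)]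
    simp
  | succ d ih =>
    intro ilo acc hd h1 hlen t ht
    by_cases hlt : ilo < n
    · rw [PySem.List.pyRange_one_cons (a := ilo) (b := n) hlt, List.foldl_cons, rsum_cons _ hlt,
        ih (ilo+1) _ (by omega) (by omega)
          (by rw [stepA_inner_len n k kinv ilo]; exact hlen) t ht,
        stepA_inner n k ilo (pvGet old ilo * kinv) hn h1 1 acc le_rfl hlen t ht]
      ring
    · rw [PySem.List.pyRange_one_eq_nil (a := ilo) (b := n) (by omega), rsum_nil (lo := ilo) _ (by omega)]
      simp

theorem modRow_get (n : Int) : ∀ (c : Int) (row : List Int), 0 ≤ c → row.length = (n+1).toNat →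
    ∀ t, 0 ≤ t →
    pvGet ((PySem.List.pyRange c (n+1)).foldl
        (fun r j => PySem.List.pySetD r j (PySem.Int.mod (pvGet r j) pvMOD)) row) t
      = if c ≤ t ∧ t ≤ n then PySem.Int.mod (pvGet row t) pvMOD else pvGet row t := by
  suffices h : ∀ (d : Nat) (c : Int) (row : List Int), (n+1) - c ≤ (d : Int) → 0 ≤ c →
      row.length = (n+1).toNat → ∀ t, 0 ≤ t →
      pvGet ((PySem.List.pyRange c (n+1)).foldl
        (fun r j => PySem.List.pySetD r j (PySem.Int.mod (pvGet r j) pvMOD)) row) t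
      = if c ≤ t ∧ t ≤ n then PySem.Int.mod (pvGet row t) pvMOD else pvGet row t by
    intro c row h1 h2 t ht
    exact h ((n+1) - c).toNat c row (by omega) h1 h2 t ht
  intro d
  induction d with
  | zero =>
    intro c row hd h1 hlen t ht
    rw [PySem.List.pyRange_one_eq_nil (by omega), List.foldl_nil, if_neg (by omega)]
  | succ d ih =>
    intro c row hd h1 hlen t ht
    by_cases hlt : c < n+1
    · rw [PySem.List.pyRange_one_cons hlt, List.foldl_cons,
        ih (c+1) _ (by omega) (by omega) (by rw [PySem.List.length_pySetD]; exact hlen) t ht]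
      by_cases htc : t = c
      · rw [if_neg (by omega), if_pos (by omega),
          pvGet_set row c _ h1 (by rw [hlen]; omega) t ht, if_pos htc, htc]
      · have hro : pvGet (PySem.List.pySetD row c (PySem.Int.mod (pvGet row c) pvMOD)) t
            = pvGet row t := by
          rw [pvGet_set row c _ h1 (by rw [hlen]; omega) t ht, if_neg htc]
        rw [hro]
        split_ifs with h2 h3 h3 <;> first | rfl | omega
    · rw [PySem.List.pyRange_one_eq_nil (by omega), List.foldl_nil, if_neg (by omega)]

-- ==== B-side characterization ====

theorem pair_fst_snd {α β : Type} (f : α → Int → α) (g : β → Int → β) :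
    ∀ (l : List Int) (P0 : α) (W0 : β),
    l.foldl (fun (pw : α × β) i => (f pw.1 i, g pw.2 i)) (P0, W0)
      = (l.foldl f P0, l.foldl g W0) := by
  intro l
  induction l with
  | nil => intro P0 W0; rfl
  | cons x xs ih => intro P0 W0; simp [List.foldl_cons, ih]

theorem prefix_fold (n : Int) (dv : Int → Int) :
    ∀ (c : Int) (P0 : List Int), 0 ≤ c → c ≤ n → P0.length = (n+1).toNat →
    ∀ t, 0 ≤ t → t ≤ n →
    pvGet ((PySem.List.pyRange c n).foldl
        (fun P i => PySem.List.pySetD P (i+1) (pvGet P i + dv i)) P0) t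
      = if t ≤ c then pvGet P0 t else pvGet P0 c + rsum c t dv := by
  suffices h : ∀ (d : Nat) (c : Int) (P0 : List Int), n - c ≤ (d : Int) → 0 ≤ c → c ≤ n →
      P0.length = (n+1).toNat → ∀ t, 0 ≤ t → t ≤ n →
      pvGet ((PySem.List.pyRange c n).foldl
        (fun P i => PySem.List.pySetD P (i+1) (pvGet P i + dv i)) P0) t
      = if t ≤ c then pvGet P0 t else pvGet P0 c + rsum c t dv by
    intro c P0 h1 h2 h3 t ht1 ht2
    exact h (n - c).toNat c P0 (by omega) h1 h2 h3 t ht1 ht2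
  intro d
  induction d with
  | zero =>
    intro c P0 hd h1 h2 hlen t ht1 ht2
    rw [PySem.List.pyRange_one_eq_nil (by omega), List.foldl_nil, if_pos (by omega)]
  | succ d ih =>
    intro c P0 hd h1 h2 hlen t ht1 ht2
    by_cases hlt : c < n
    · rw [PySem.List.pyRange_one_cons hlt, List.foldl_cons,
        ih (c+1) _ (by omega) (by omega) (by omega)
          (by rw [PySem.List.length_pySetD]; exact hlen) t ht1 ht2]
      have hget : ∀ u : Int, 0 ≤ u →
          pvGet (PySem.List.pySetD P0 (c+1) (pvGet P0 c + dv c)) u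
            = if u = c+1 then pvGet P0 c + dv c else pvGet P0 u := by
        intro u hu
        exact pvGet_set P0 (c+1) _ (by omega) (by rw [hlen]; omega) u hu
      by_cases hc1 : t ≤ c
      · rw [if_pos (by omega), if_pos hc1, hget t ht1, if_neg (by omega)]
      · by_cases hc2 : t = c+1
        · rw [if_pos (by omega), hget t ht1, if_pos hc2, if_neg hc1, hc2,
            rsum_cons _ (by omega), rsum_nil _ (by omega)]
          ring
        · rw [if_neg (by omega), if_neg hc1, hget (c+1) (by omega), if_pos rfl,
            rsum_cons (lo := c) _ (by omega)]
          ring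
    · rw [PySem.List.pyRange_one_eq_nil (by omega), List.foldl_nil, if_pos (by omega)]

theorem setfold_get (n : Int) (v : Int → Int) :
    ∀ (c : Int) (acc : List Int), 0 ≤ c → acc.length = (n+1).toNat → ∀ t, 0 ≤ t →
    pvGet ((PySem.List.pyRange c n).foldl
        (fun l m => PySem.List.pySetD l m (v m)) acc) t
      = if c ≤ t ∧ t < n then v t else pvGet acc t := by
  suffices h : ∀ (d : Nat) (c : Int) (acc : List Int), n - c ≤ (d : Int) → 0 ≤ c →
      acc.length = (n+1).toNat → ∀ t, 0 ≤ t →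
      pvGet ((PySem.List.pyRange c n).foldl
        (fun l m => PySem.List.pySetD l m (v m)) acc) t
      = if c ≤ t ∧ t < n then v t else pvGet acc t by
    intro c acc h1 h2 t ht
    exact h (n - c).toNat c acc (by omega) h1 h2 t ht
  intro d
  induction d with
  | zero =>
    intro c acc hd h1 hlen t ht
    rw [PySem.List.pyRange_one_eq_nil (by omega), List.foldl_nil, if_neg (by omega)]
  | succ d ih =>
    intro c acc hd h1 hlen t ht
    by_cases hlt : c < n
    · rw [PySem.List.pyRange_one_cons hlt, List.foldl_cons,
        ih (c+1) _ (by omega) (by omega) (by rw [PySem.List.length_pySetD]; exact hlen) t ht,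
        pvGet_set acc c (v c) h1 (by rw [hlen]; omega) t ht]
      split_ifs with h2 h3 h4 <;> first | rfl | omega | (subst h4; rfl)
    · rw [PySem.List.pyRange_one_eq_nil (by omega), List.foldl_nil, if_neg (by omega)]

-- ==== the two step functions agree ====

theorem pvMOD_pos : (0 : Int) < pvMOD := by norm_num [pvMOD]

theorem pvMod_zero : PySem.Int.mod 0 pvMOD = 0 := by
  rw [PySem.Int.mod_eq_emod_of_pos pvMOD_pos]; simp

theorem getElem_pvGet (xs : List Int) (m : Nat) (h : m < xs.length) :
    xs[m] = pvGet xs (m : Int) := by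
  unfold pvGet
  rw [PySem.List.pyGetD_natCast, List.getD_eq_getElem xs 0 h]

theorem pw_eq (dist : List Int) (l : List Int) (P0 W0 : List Int) :
    l.foldl (fun (pw : List Int × List Int) i =>
      (PySem.List.pySetD pw.1 (i+1) (pvGet pw.1 i + pvGet dist i),
       PySem.List.pySetD pw.2 (i+1) (pvGet pw.2 i + i * pvGet dist i))) (P0, W0)
    = (l.foldl (fun P i => PySem.List.pySetD P (i+1) (pvGet P i + pvGet dist i)) P0,
       l.foldl (fun W i => PySem.List.pySetD W (i+1) (pvGet W i + i * pvGet dist i)) W0) :=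
  pair_fst_snd (fun P i => PySem.List.pySetD P (i+1) (pvGet P i + pvGet dist i))
    (fun W i => PySem.List.pySetD W (i+1) (pvGet W i + i * pvGet dist i)) l P0 W0

theorem stepB_length (n k kinv : Int) (dist : List Int) :
    (pvStepB n k kinv dist).length = (n+1).toNat := by
  simp only [pvStepB]
  rw [PySem.List.length_pySetD,
    foldl_length_inv _ _ _ (fun acc m => PySem.List.length_pySetD _ _ _),
    List.length_replicate]

theorem rowEq (n k kinv : Int) (hn : 1 ≤ n) (hk : 0 ≤ k) (dist : List Int) :
    pvModRow n (pvStepA n k kinv dist (List.replicate (n+1).toNat 0)) = pvStepB n k kinv dist := by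
  have hsl : (pvStepA n k kinv dist (List.replicate (n+1).toNat 0)).length = (n+1).toNat := by
    unfold pvStepA
    rw [foldl_length_inv _ _ _
      (fun acc i => stepA_inner_len n k kinv i (pvGet dist i * kinv) 1 acc),
      List.length_replicate]
  have hml : (pvModRow n (pvStepA n k kinv dist (List.replicate (n+1).toNat 0))).length
      = (n+1).toNat := by
    unfold pvModRow
    rw [foldl_length_inv _ _ _ (fun acc j => PySem.List.length_pySetD _ _ _)]
    exact hsl
  have hA : ∀ t : Int, 0 ≤ t → t ≤ n →
      pvGet (pvModRow n (pvStepA n k kinv dist (List.replicate (n+1).toNat 0))) t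
        = PySem.Int.mod (rsum 0 n (fun i => rsum 1 (k+1)
            (fun j => if t = min n (i+j) then pvGet dist i * kinv else 0))) pvMOD := by
    intro t ht1 ht2
    unfold pvModRow
    rw [modRow_get n 0 _ (by omega) hsl t ht1, if_pos (by omega)]
    unfold pvStepA
    rw [stepA_outer n k kinv dist hn 0 _ (by omega) (by simp) t ht1,
      pvGet_replicate _ t ht1, zero_add]
  -- the B-side prefix-sum lists
  have hP : ∀ t : Int, 0 ≤ t → t ≤ n →
      pvGet ((PySem.List.pyRange 0 n).foldl
        (fun P i => PySem.List.pySetD P (i+1) (pvGet P i + pvGet dist i))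
        (List.replicate (n+1).toNat 0)) t = rsum 0 t (fun i => pvGet dist i) := by
    intro t ht1 ht2
    rw [prefix_fold n _ 0 _ le_rfl (by omega) (by simp) t ht1 ht2]
    by_cases h0 : t ≤ 0
    · rw [if_pos h0, pvGet_replicate _ t ht1, rsum_nil _ (by omega)]
    · rw [if_neg h0, pvGet_replicate _ 0 le_rfl, zero_add]
  have hW : ∀ t : Int, 0 ≤ t → t ≤ n →
      pvGet ((PySem.List.pyRange 0 n).foldl
        (fun W i => PySem.List.pySetD W (i+1) (pvGet W i + i * pvGet dist i))
        (List.replicate (n+1).toNat 0)) t = rsum 0 t (fun i => i * pvGet dist i) := by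
    intro t ht1 ht2
    rw [prefix_fold n _ 0 _ le_rfl (by omega) (by simp) t ht1 ht2]
    by_cases h0 : t ≤ 0
    · rw [if_pos h0, pvGet_replicate _ t ht1, rsum_nil _ (by omega)]
    · rw [if_neg h0, pvGet_replicate _ 0 le_rfl, zero_add]
  have key : ∀ t : Int, 0 ≤ t → t ≤ n →
      pvGet (pvModRow n (pvStepA n k kinv dist (List.replicate (n+1).toNat 0))) t
        = pvGet (pvStepB n k kinv dist) t := by
    intro t ht1 ht2
    rw [hA t ht1 ht2]
    simp only [pvStepB]
    rw [pw_eq]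
    rw [pvGet_set _ n _ (by omega)
      (by rw [foldl_length_inv _ _ _ (fun acc m => PySem.List.length_pySetD _ _ _),
              List.length_replicate]; omega) t ht1]
    by_cases htn : t = n
    · rw [if_pos htn, htn]
      rw [hP n (by omega) le_rfl, hP (max 0 (n-k)) (by omega) (by omega),
        hW n (by omega) le_rfl, hW (max 0 (n-k)) (by omega) (by omega)]
      have e1 : ∀ i, 0 ≤ i → i < n →
          rsum 1 (k+1) (fun j => if (n : Int) = min n (i+j) then pvGet dist i * kinv else 0)
            = ((k+1-(n-i)).toNat : Int) * (pvGet dist i * kinv) := by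
        intro i hi1 hi2
        beta_reduce
        rw [rsum_congr (g := fun j => if n - i ≤ j then pvGet dist i * kinv else 0)
          (by intro j hj1 hj2
              beta_reduce
              by_cases hc : n - i ≤ j
              · rw [if_pos hc, if_pos (by omega)]
              · rw [if_neg hc, if_neg (by omega)]),
          rsum_indicator_ge _ (by omega)]
      rw [rsum_congr e1, rsum_split (max 0 (n-k)) _ (by omega) (by omega),
        rsum_zero (lo := 0) (hi := max 0 (n-k))
          (by intro i hi1 hi2; rw [Int.toNat_of_nonpos (by omega)]; ring),
        zero_add,
        rsum_congr (g := fun i => kinv * ((k-n+1) * pvGet dist i) + kinv * (i * pvGet dist i))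
          (by intro i hi1 hi2; beta_reduce; rw [show ((k+1-(n-i)).toNat : Int) = i+k-n+1 by omega]; ring),
        rsum_add, rsum_cmul kinv (fun i => (k-n+1) * pvGet dist i),
        rsum_cmul kinv (fun i => i * pvGet dist i),
        rsum_cmul (k-n+1) (fun i => pvGet dist i),
        rsum_split (m := max 0 (n-k)) (lo := 0) (hi := n) (fun i => pvGet dist i)
          (by omega) (by omega),
        rsum_split (m := max 0 (n-k)) (lo := 0) (hi := n) (fun i => i * pvGet dist i)
          (by omega) (by omega)]
      congr 1
      ring
    · rw [if_neg htn,
        setfold_get n _ 1 _ (by omega)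
          (by rw [List.length_replicate]) t ht1]
      by_cases ht0 : 1 ≤ t
      · rw [if_pos (by omega)]
        rw [hP t (by omega) (by omega), hP (max 0 (t-k)) (by omega) (by omega)]
        have e2 : ∀ i, 0 ≤ i → i < n →
            rsum 1 (k+1) (fun j => if t = min n (i+j) then pvGet dist i * kinv else 0)
              = if max 0 (t-k) ≤ i ∧ i < t then pvGet dist i * kinv else 0 := by
          intro i hi1 hi2
          beta_reduce
          rw [rsum_congr (g := fun j => if j = t - i then pvGet dist i * kinv else 0)
            (by intro j hj1 hj2
                beta_reduce
                by_cases hc : j = t - i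
                · rw [if_pos hc, if_pos (by omega)]
                · rw [if_neg hc, if_neg (by omega)]),
            rsum_indicator]
          by_cases hc : max 0 (t-k) ≤ i ∧ i < t
          · rw [if_pos (by omega), if_pos hc]
          · rw [if_neg (by omega), if_neg hc]
        rw [rsum_congr e2,
          rsum_split (max 0 (t-k)) _ (by omega) (by omega),
          rsum_zero (lo := 0) (hi := max 0 (t-k))
            (by intro i hi1 hi2; rw [if_neg (by omega)]),
          zero_add,
          rsum_split t (lo := max 0 (t-k)) (hi := n) _ (by omega) (by omega),
          rsum_zero (lo := t) (hi := n) (by intro i hi1 hi2; rw [if_neg (by omega)]),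
          add_zero,
          rsum_congr (g := fun i => kinv * pvGet dist i)
            (by intro i hi1 hi2; beta_reduce; rw [if_pos (by omega)]; ring),
          rsum_cmul,
          rsum_split (m := max 0 (t-k)) (lo := 0) (hi := t) (fun i => pvGet dist i)
            (by omega) (by omega)]
        congr 1
        ring
      · have hz : ∀ i : Int, 0 ≤ i → i < n →
            rsum 1 (k+1) (fun j => if t = min n (i+j) then pvGet dist i * kinv else 0) = 0 := by
          intro i hi1 hi2
          refine rsum_zero ?_
          intro j hj1 hj2
          beta_reduce
          rw [if_neg (by omega)]
        rw [if_neg (by omega), pvGet_replicate _ t ht1, rsum_zero hz, pvMod_zero]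
  apply List.ext_getElem (by rw [hml, stepB_length])
  intro m h1 h2
  rw [getElem_pvGet _ m h1, getElem_pvGet _ m h2]
  have hm : m < (n+1).toNat := by rw [← hml]; exact h1
  exact key (m : Int) (by omega) (by omega)

-- ==== table / hits ====

theorem pvGetRow_replicate (r : List Int) (mm : Nat) (t : Int) (ht : 0 ≤ t)
    (hlt : t.toNat < mm) : pvGetRow (List.replicate mm r) t = r := by
  unfold pvGetRow
  rw [PySem.List.pyGetD_of_nonneg _ _ ht, List.getD_eq_getElem _ _ (by simpa using hlt)]
  simp

theorem tableA_spec (n s k kinv : Int) (hn : 0 ≤ n) (hk : 0 ≤ k) :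
    ∀ (c : Nat), (c : Int) ≤ n → ∀ (t : Nat), (t : Int) ≤ n →
    pvGetRow ((PySem.List.pyRange 0 (c : Int)).foldl
        (fun tbl t => PySem.List.pySetD tbl (t+1)
          (pvModRow n (pvStepA n k kinv (pvGetRow tbl t) (pvGetRow tbl (t+1)))))
        (PySem.List.pySetD (List.replicate (n+1).toNat (List.replicate (n+1).toNat 0)) 0 (pvSeed n s))) (t : Int)
      = if t ≤ c then itB n k kinv s t else List.replicate (n+1).toNat 0 := by
  intro c
  induction c with
  | zero =>
    intro hc t htn
    rw [show ((0:Nat):Int) = 0 by rfl, PySem.List.pyRange_one_eq_nil le_rfl, List.foldl_nil,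
      pvGetRow_set _ 0 _ le_rfl (by simp; omega) (t : Int) (by omega)]
    by_cases h0 : t = 0
    · subst h0
      simp [itB]
    · rw [if_neg (by omega), if_neg (by omega),
        pvGetRow_replicate _ _ _ (by omega) (by omega)]
  | succ c ih =>
    intro hc t htn
    have hc' : (c : Int) ≤ n := by push_cast at hc; omega
    have hcast : ((c+1 : Nat) : Int) = (c : Int) + 1 := by push_cast; ring
    rw [hcast, PySem.List.pyRange_one_succ_right (by positivity), List.foldl_append,
      List.foldl_cons, List.foldl_nil]
    have hlen : ((PySem.List.pyRange 0 (c : Int)).foldl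
        (fun tbl t => PySem.List.pySetD tbl (t+1)
          (pvModRow n (pvStepA n k kinv (pvGetRow tbl t) (pvGetRow tbl (t+1)))))
        (PySem.List.pySetD (List.replicate (n+1).toNat (List.replicate (n+1).toNat 0)) 0
          (pvSeed n s))).length = (n+1).toNat := by
      rw [foldl_length_inv _ _ _ (fun acc x => PySem.List.length_pySetD _ _ _),
        PySem.List.length_pySetD, List.length_replicate]
    have hrowc := ih hc' c hc'
    rw [if_pos le_rfl] at hrowc
    have hrowc1 := ih hc' (c+1) (by push_cast; omega)
    rw [if_neg (by omega), hcast] at hrowc1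
    rw [hrowc, hrowc1, rowEq n k kinv (by push_cast at hc; omega) hk (itB n k kinv s c),
      show pvStepB n k kinv (itB n k kinv s c) = itB n k kinv s (c+1) from rfl,
      pvGetRow_set _ ((c : Int)+1) _ (by omega) (by rw [hlen]; push_cast at hc; omega)
        (t : Int) (by omega)]
    by_cases hteq : (t : Int) = (c : Int) + 1
    · rw [if_pos hteq, if_pos (by omega), show t = c + 1 by omega]
    · rw [if_neg hteq, ih hc' t htn]
      split_ifs with h1 h2 h2 <;> first | rfl | omega

theorem hits_inv (n s k kinv : Int) :
    ∀ (c : Nat), (c : Int) ≤ n →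
    (PySem.List.pyRange 0 (c : Int)).foldl
      (fun (st : List Int × List Int) _ =>
        (pvStepB n k kinv st.1, st.2 ++ [pvGet (pvStepB n k kinv st.1) n]))
      (pvSeed n s, [pvGet (pvSeed n s) n])
    = (itB n k kinv s c,
       (PySem.List.pyRange 0 ((c : Int)+1)).map (fun t => pvGet (itB n k kinv s t.toNat) n)) := by
  intro c
  induction c with
  | zero =>
    intro hc
    rw [show ((0:Nat):Int) = 0 by rfl, PySem.List.pyRange_one_eq_nil le_rfl, List.foldl_nil,
      show (0:Int)+1 = 0+1 by ring, PySem.List.pyRange_one_succ_right le_rfl,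
      PySem.List.pyRange_one_eq_nil le_rfl]
    simp [itB]
  | succ c ih =>
    intro hc
    have hc' : (c : Int) ≤ n := by push_cast at hc; omega
    have hcast : ((c+1 : Nat) : Int) = (c : Int) + 1 := by push_cast; ring
    rw [hcast, PySem.List.pyRange_one_succ_right (by positivity), List.foldl_append,
      ih hc', List.foldl_cons, List.foldl_nil]
    refine Prod.ext rfl ?_
    simp only []
    conv_rhs => rw [PySem.List.pyRange_one_succ_right (by positivity : (0:Int) ≤ (c : Int)+1)]
    rw [List.map_append]
    congr 1

theorem hits_spec (n s k kinv : Int) (hn : 0 ≤ n) :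
    pvFirstArrivals n s k kinv
      = (PySem.List.pyRange 0 (n+1)).map (fun t => pvGet (itB n k kinv s t.toNat) n) := by
  simp only [pvFirstArrivals]
  have h := hits_inv n s k kinv n.toNat (by omega)
  rw [show ((n.toNat : Nat) : Int) = n by omega] at h
  rw [h]

-- ==== final folds ====

theorem foldA_mod (F : Int → Int) : ∀ (m : Int), 1 ≤ m →
    (PySem.List.pyRange 0 m).foldl (fun res t => PySem.Int.mod (res + F t) pvMOD) 0
      = (rsum 0 m F) % pvMOD := by
  intro m hm
  induction m, hm using Int.le_induction with
  | base =>
    rw [PySem.List.pyRange_one_cons (by omega : (0:Int) < 1),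
      PySem.List.pyRange_one_eq_nil (by omega : (1:Int) ≤ 0+1),
      rsum_cons _ (by omega : (0:Int) < 1), rsum_nil _ (by omega : (1:Int) ≤ 0+1),
      List.foldl_cons, List.foldl_nil, PySem.Int.mod_eq_emod_of_pos pvMOD_pos]
    simp
  | succ m hm ih =>
    rw [PySem.List.pyRange_one_succ_right (by omega), List.foldl_append,
      List.foldl_cons, List.foldl_nil, ih, PySem.Int.mod_eq_emod_of_pos pvMOD_pos,
      Int.emod_add_emod, rsum_snoc _ (by omega)]

theorem foldB_mod (x y : Int → Int) (n : Int) (_hn : 0 ≤ n) :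
    ∀ (c : Int), 0 ≤ c → c ≤ n+1 →
    (((PySem.List.pyRange c (n+1)).reverse).foldl
      (fun (rs : Int × Int) t =>
        let suf := PySem.Int.mod (rs.2 + y t) pvMOD
        (PySem.Int.mod (rs.1 + x t * suf) pvMOD, suf)) ((0 : Int), (0 : Int)))
      = ((rsum c (n+1) (fun t => x t * ((rsum t (n+1) y) % pvMOD))) % pvMOD,
         (rsum c (n+1) y) % pvMOD) := by
  suffices h : ∀ (d : Nat) (c : Int), (n+1) - c ≤ (d : Int) → 0 ≤ c → c ≤ n+1 →
      (((PySem.List.pyRange c (n+1)).reverse).foldl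
        (fun (rs : Int × Int) t =>
          let suf := PySem.Int.mod (rs.2 + y t) pvMOD
          (PySem.Int.mod (rs.1 + x t * suf) pvMOD, suf)) ((0 : Int), (0 : Int)))
      = ((rsum c (n+1) (fun t => x t * ((rsum t (n+1) y) % pvMOD))) % pvMOD,
         (rsum c (n+1) y) % pvMOD) by
    intro c h1 h2
    exact h ((n+1) - c).toNat c (by omega) h1 h2
  intro d
  induction d with
  | zero =>
    intro c hd h1 h2
    have hc : c = n+1 := by omega
    subst hc
    rw [PySem.List.pyRange_one_eq_nil le_rfl, rsum_nil _ le_rfl, rsum_nil _ le_rfl]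
    simp
  | succ d ih =>
    intro c hd h1 h2
    by_cases hlt : c < n+1
    · rw [PySem.List.pyRange_one_cons hlt, List.reverse_cons, List.foldl_append,
        ih (c+1) (by omega) (by omega) (by omega), List.foldl_cons, List.foldl_nil]
      have hsnd : PySem.Int.mod ((rsum (c+1) (n+1) y) % pvMOD + y c) pvMOD
          = (rsum c (n+1) y) % pvMOD := by
        rw [PySem.Int.mod_eq_emod_of_pos pvMOD_pos, Int.emod_add_emod,
          rsum_cons y hlt, add_comm]
      refine Prod.ext ?_ ?_
      · simp only []
        rw [hsnd, PySem.Int.mod_eq_emod_of_pos pvMOD_pos, Int.emod_add_emod,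
          rsum_cons (fun t => x t * ((rsum t (n+1) y) % pvMOD)) hlt]
        rw [add_comm]
      · simp only []
        exact hsnd
    · have hc : c = n+1 := by omega
      subst hc
      rw [PySem.List.pyRange_one_eq_nil le_rfl, rsum_nil _ le_rfl, rsum_nil _ le_rfl]
      simp

theorem tableA_row (n s k kinv : Int) (hn : 0 ≤ n) (hk : 0 ≤ k) (t : Int)
    (h1 : 0 ≤ t) (h2 : t ≤ n) :
    pvGetRow (pvTableA n s k kinv) t = itB n k kinv s t.toNat := by
  unfold pvTableA
  have h := tableA_spec n s k kinv hn hk n.toNat (by omega) t.toNat (by omega)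
  rw [if_pos (by omega)] at h
  rw [show ((n.toNat : Nat) : Int) = n by omega,
    show ((t.toNat : Nat) : Int) = t by omega] at h
  exact h

theorem pvGet_map_range (f : Int → Int) (m t : Int) (h1 : 0 ≤ t) (h2 : t < m) :
    pvGet ((PySem.List.pyRange 0 m).map f) t = f t := by
  unfold pvGet
  exact PySem.List.pyGetD_map_pyRange_of_nonneg f m t 0 h1 h2

-- ===== VERDICT (by name: the statement is the Claim_ definition above) =====
theorem solve_spec : Claim_equal_solve := by
  unfold Claim_equal_solve
  intro n a b p q hdom hpre
  unfold Spec_solve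
  obtain ⟨hn, ha1, ha2, hb1, hb2, hp, hq⟩ := hpre
  simp only [solve, solve_alt]
  rw [hits_spec n a p _ hn, hits_spec n b q _ hn]
  rw [PySem.List.foldl_congr_mem ((PySem.List.pyRange 0 (n+1)).reverse) _
    (fun (rs : Int × Int) t =>
      let suf := PySem.Int.mod (rs.2 + pvGet (itB n q (pvPowMod q 998244351 pvMOD) b t.toNat) n) pvMOD
      (PySem.Int.mod (rs.1 + pvGet (itB n p (pvPowMod p 998244351 pvMOD) a t.toNat) n * suf) pvMOD, suf))
    ((0 : Int), (0 : Int))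
    (by
      intro rs t ht
      rw [List.mem_reverse] at ht
      obtain ⟨ht1, ht2⟩ := PySem.List.mem_pyRange_one.1 ht
      simp only [pvGet_map_range _ (n+1) t ht1 ht2])]
  rw [foldB_mod (fun t => pvGet (itB n p (pvPowMod p 998244351 pvMOD) a t.toNat) n)
    (fun t => pvGet (itB n q (pvPowMod q 998244351 pvMOD) b t.toNat) n)
    n hn 0 le_rfl (by omega)]
  rw [PySem.List.foldl_congr_mem (PySem.List.pyRange 0 (n+1)) _
    (fun res t => PySem.Int.mod (res +
      pvGet (itB n p (pvPowMod p 998244351 pvMOD) a t.toNat) n *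
      rsum t (n+1) (fun u => pvGet (itB n q (pvPowMod q 998244351 pvMOD) b u.toNat) n)) pvMOD) 0
    (by
      intro res t ht
      obtain ⟨ht1, ht2⟩ := PySem.List.mem_pyRange_one.1 ht
      rw [tableA_row n a p _ hn hp t ht1 (by omega)]
      rw [PySem.List.foldl_congr_mem (PySem.List.pyRange t (n+1)) _
        (fun s u => s + pvGet (itB n q (pvPowMod q 998244351 pvMOD) b u.toNat) n) 0
        (by
          intro acc u hu
          obtain ⟨hu1, hu2⟩ := PySem.List.mem_pyRange_one.1 hu
          rw [tableA_row n b q _ hn hq u (by omega) (by omega)])]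
      simp only [PySem.List.foldl_add]
      rw [zero_add]
      rfl)]
  rw [foldA_mod _ (n+1) (by omega)]
  exact rsum_modeq (n+1).toNat (by omega) (fun i h1 h2 =>
    Int.ModEq.mul (Int.ModEq.refl _)
      ((Int.emod_emod_of_dvd _ dvd_rfl).symm))
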